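-- pv_equiv track=rewrite | github.com/Kemalyavas/Scraping | scripts/match_fittings.py | _threads_match
-- ===== SOURCE A (Python) =====
-- def _threads_match(balflex_thread: str, heizmann_thread: str) -> bool:
--     """Check if thread types match"""
--     if not balflex_thread or not heizmann_thread:
--         return False
--
--     bal = balflex_thread.upper()
--     heiz = heizmann_thread.upper()
--
--     # Exact match
--     if bal == heiz:
--         return True
--
--     # Thread type equivalents
--     thread_groups = [
--         ['JIC', 'JIC 37', 'JIC 37°', 'SAE J514'],
--         ['ORFS', 'O-RING FACE SEAL'],
--         ['BSP', 'BSPP', 'BSPT', 'G'],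
--         ['NPT', 'NPTF'],
--         ['METRIC', 'M', 'DIN'],
--     ]
--
--     for group in thread_groups:
--         if any(t in bal for t in group) and any(t in heiz for t in group):
--             return True
--
--     # Size-based thread matching (e.g., "9/16-18 UNF" contains JIC info)
--     if 'UNF' in heiz or 'UN' in heiz:
--         if 'JIC' in bal:
--             return True
--
--     return False
-- ===== SOURCE B (Python) =====
-- # Bitmask table: each synonym group is one bit; the directional UNF/UN <-> JIC
-- # rule is folded in as an extra shared bit (bit 5) instead of a separate branch.
-- _BAL_BITS = [
--     ('JIC', 0b100001), ('JIC 37', 0b000001), ('JIC 37\u00b0', 0b000001), ('SAE J514', 0b000001),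
--     ('ORFS', 0b000010), ('O-RING FACE SEAL', 0b000010),
--     ('BSP', 0b000100), ('BSPP', 0b000100), ('BSPT', 0b000100), ('G', 0b000100),
--     ('NPT', 0b001000), ('NPTF', 0b001000),
--     ('METRIC', 0b010000), ('M', 0b010000), ('DIN', 0b010000),
-- ]
-- _HEIZ_BITS = [
--     ('JIC', 0b000001), ('JIC 37', 0b000001), ('JIC 37\u00b0', 0b000001), ('SAE J514', 0b000001),
--     ('ORFS', 0b000010), ('O-RING FACE SEAL', 0b000010),
--     ('BSP', 0b000100), ('BSPP', 0b000100), ('BSPT', 0b000100), ('G', 0b000100),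
--     ('NPT', 0b001000), ('NPTF', 0b001000),
--     ('METRIC', 0b010000), ('M', 0b010000), ('DIN', 0b010000),
--     ('UNF', 0b100000), ('UN', 0b100000),
-- ]
--
--
-- def _mask(s: str, table) -> int:
--     m = 0
--     for term, bits in table:
--         if term in s:
--             m |= bits
--     return m
--
--
-- def _threads_match(balflex_thread: str, heizmann_thread: str) -> bool:
--     """Check if thread types match"""
--     if not balflex_thread or not heizmann_thread:
--         return False
--     bal = balflex_thread.upper()
--     heiz = heizmann_thread.upper()
--     return bal == heiz or (_mask(bal, _BAL_BITS) & _mask(heiz, _HEIZ_BITS)) != 0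
-- ===== Notes on version B (the rewrite author's own statement) =====
-- stated objective: alternative
-- what changed: A's per-group loop plus its separate trailing UNF/UN-vs-JIC branch are replaced by a single mechanism: two per-side term-to-bitmask tables (the directional UNF/UN<->JIC rule is just an extra shared bit) folded into one integer mask per string, with the decision made by one bitwise AND.
import Mathlib
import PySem

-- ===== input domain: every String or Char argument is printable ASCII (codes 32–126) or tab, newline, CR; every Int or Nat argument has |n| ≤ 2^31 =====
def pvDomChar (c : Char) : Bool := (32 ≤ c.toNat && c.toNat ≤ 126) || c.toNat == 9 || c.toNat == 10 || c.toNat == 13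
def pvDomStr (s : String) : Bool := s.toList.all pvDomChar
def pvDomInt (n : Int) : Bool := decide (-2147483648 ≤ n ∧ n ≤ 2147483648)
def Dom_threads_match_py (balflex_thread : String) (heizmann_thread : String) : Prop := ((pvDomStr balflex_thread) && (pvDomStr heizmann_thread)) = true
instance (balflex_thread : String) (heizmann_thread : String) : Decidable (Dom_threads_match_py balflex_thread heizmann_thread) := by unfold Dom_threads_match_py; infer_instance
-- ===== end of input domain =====

-- B replaces A's per-group loop and separate UNF/UN↔JIC branch by per-side term→bitmask
-- tables folded into one integer mask per string, decided by a single bitwise AND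
-- (objective: alternative mechanism, same cost).

-- ===== PORT A =====
def pvThreadGroups : List (List String) :=
  [["JIC", "JIC 37", "JIC 37°", "SAE J514"],
   ["ORFS", "O-RING FACE SEAL"],
   ["BSP", "BSPP", "BSPT", "G"],
   ["NPT", "NPTF"],
   ["METRIC", "M", "DIN"]]

def threads_match_py (balflex_thread : String) (heizmann_thread : String) : Bool :=
  -- `if not balflex_thread or not heizmann_thread: return False`
  if balflex_thread.toList.isEmpty || heizmann_thread.toList.isEmpty then false
  else
    let bal := PySem.Str.upper balflex_thread
    let heiz := PySem.Str.upper heizmann_thread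
    if bal == heiz then true
    else
      -- `for group in thread_groups: if any(...) and any(...): return True`
      if pvThreadGroups.any (fun group =>
            group.any (fun t => PySem.Str.isIn t bal) && group.any (fun t => PySem.Str.isIn t heiz)) then true
      else
        if PySem.Str.isIn "UNF" heiz || PySem.Str.isIn "UN" heiz then
          if PySem.Str.isIn "JIC" bal then true else false
        else false

-- ===== PORT B =====
-- term → bitmask tables (bit k = synonym group k; bit 5 = the directional UNF/UN↔JIC rule)
def pvBalTable : List (String × Nat) :=
  [("JIC", 33), ("JIC 37", 1), ("JIC 37°", 1), ("SAE J514", 1),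
   ("ORFS", 2), ("O-RING FACE SEAL", 2),
   ("BSP", 4), ("BSPP", 4), ("BSPT", 4), ("G", 4),
   ("NPT", 8), ("NPTF", 8),
   ("METRIC", 16), ("M", 16), ("DIN", 16)]

def pvHeizTable : List (String × Nat) :=
  [("JIC", 1), ("JIC 37", 1), ("JIC 37°", 1), ("SAE J514", 1),
   ("ORFS", 2), ("O-RING FACE SEAL", 2),
   ("BSP", 4), ("BSPP", 4), ("BSPT", 4), ("G", 4),
   ("NPT", 8), ("NPTF", 8),
   ("METRIC", 16), ("M", 16), ("DIN", 16),
   ("UNF", 32), ("UN", 32)]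

-- `_mask(s, table)`: m = 0; for term, bits in table: if term in s: m |= bits
def pvMask (s : String) (table : List (String × Nat)) : Nat :=
  table.foldl (fun m tb => if PySem.Str.isIn tb.1 s then m ||| tb.2 else m) 0

def threads_match_py_alt (balflex_thread : String) (heizmann_thread : String) : Bool :=
  if balflex_thread.toList.isEmpty || heizmann_thread.toList.isEmpty then false
  else
    let bal := PySem.Str.upper balflex_thread
    let heiz := PySem.Str.upper heizmann_thread
    (bal == heiz) || !(pvMask bal pvBalTable &&& pvMask heiz pvHeizTable == 0)

-- ===== PRECONDITION & SPEC =====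
def Spec_threads_match_py (balflex_thread : String) (heizmann_thread : String) (out : Bool) : Prop := out = threads_match_py_alt balflex_thread heizmann_thread
instance (balflex_thread : String) (heizmann_thread : String) (out : Bool) : Decidable (Spec_threads_match_py balflex_thread heizmann_thread out) := by unfold Spec_threads_match_py; infer_instance

-- ===== CLAIM (what is proved, stated in full; the proofs are below) =====
def Claim_equal_threads_match_py : Prop := ∀ (balflex_thread : String) (heizmann_thread : String), Dom_threads_match_py balflex_thread heizmann_thread → Spec_threads_match_py balflex_thread heizmann_thread (threads_match_py balflex_thread heizmann_thread)

-- ===== LEMMAS AND PROOFS =====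

lemma pv_tb_1_0 : Nat.testBit 1 0 = true := by decide
lemma pv_tb_1_1 : Nat.testBit 1 1 = false := by decide
lemma pv_tb_1_2 : Nat.testBit 1 2 = false := by decide
lemma pv_tb_1_3 : Nat.testBit 1 3 = false := by decide
lemma pv_tb_1_4 : Nat.testBit 1 4 = false := by decide
lemma pv_tb_1_5 : Nat.testBit 1 5 = false := by decide
lemma pv_tb_2_0 : Nat.testBit 2 0 = false := by decide
lemma pv_tb_2_1 : Nat.testBit 2 1 = true := by decide
lemma pv_tb_2_2 : Nat.testBit 2 2 = false := by decide
lemma pv_tb_2_3 : Nat.testBit 2 3 = false := by decide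
lemma pv_tb_2_4 : Nat.testBit 2 4 = false := by decide
lemma pv_tb_2_5 : Nat.testBit 2 5 = false := by decide
lemma pv_tb_4_0 : Nat.testBit 4 0 = false := by decide
lemma pv_tb_4_1 : Nat.testBit 4 1 = false := by decide
lemma pv_tb_4_2 : Nat.testBit 4 2 = true := by decide
lemma pv_tb_4_3 : Nat.testBit 4 3 = false := by decide
lemma pv_tb_4_4 : Nat.testBit 4 4 = false := by decide
lemma pv_tb_4_5 : Nat.testBit 4 5 = false := by decide
lemma pv_tb_8_0 : Nat.testBit 8 0 = false := by decide
lemma pv_tb_8_1 : Nat.testBit 8 1 = false := by decide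
lemma pv_tb_8_2 : Nat.testBit 8 2 = false := by decide
lemma pv_tb_8_3 : Nat.testBit 8 3 = true := by decide
lemma pv_tb_8_4 : Nat.testBit 8 4 = false := by decide
lemma pv_tb_8_5 : Nat.testBit 8 5 = false := by decide
lemma pv_tb_16_0 : Nat.testBit 16 0 = false := by decide
lemma pv_tb_16_1 : Nat.testBit 16 1 = false := by decide
lemma pv_tb_16_2 : Nat.testBit 16 2 = false := by decide
lemma pv_tb_16_3 : Nat.testBit 16 3 = false := by decide
lemma pv_tb_16_4 : Nat.testBit 16 4 = true := by decide
lemma pv_tb_16_5 : Nat.testBit 16 5 = false := by decide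
lemma pv_tb_32_0 : Nat.testBit 32 0 = false := by decide
lemma pv_tb_32_1 : Nat.testBit 32 1 = false := by decide
lemma pv_tb_32_2 : Nat.testBit 32 2 = false := by decide
lemma pv_tb_32_3 : Nat.testBit 32 3 = false := by decide
lemma pv_tb_32_4 : Nat.testBit 32 4 = false := by decide
lemma pv_tb_32_5 : Nat.testBit 32 5 = true := by decide
lemma pv_tb_33_0 : Nat.testBit 33 0 = true := by decide
lemma pv_tb_33_1 : Nat.testBit 33 1 = false := by decide
lemma pv_tb_33_2 : Nat.testBit 33 2 = false := by decide
lemma pv_tb_33_3 : Nat.testBit 33 3 = false := by decide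
lemma pv_tb_33_4 : Nat.testBit 33 4 = false := by decide
lemma pv_tb_33_5 : Nat.testBit 33 5 = true := by decide

-- bit i of the mask fold = some table entry matches s and carries bit i
lemma pv_testBit_foldl (table : List (String × Nat)) (s : String) (m i : Nat) :
    (table.foldl (fun m tb => if PySem.Str.isIn tb.1 s then m ||| tb.2 else m) m).testBit i
    = (m.testBit i || table.any (fun tb => PySem.Str.isIn tb.1 s && tb.2.testBit i)) := by
  induction table generalizing m with
  | nil => simp
  | cons x xs ih =>
    simp only [List.foldl_cons, List.any_cons, ih]
    by_cases h : PySem.Chars.isIn x.1.toList s.toList = true <;>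
      simp [PySem.Str.isIn, h, Nat.testBit_or, Bool.or_assoc]

lemma pv_land_ne_zero_iff (a b : Nat) :
    a &&& b ≠ 0 ↔ ∃ i, a.testBit i = true ∧ b.testBit i = true := by
  constructor
  · intro h
    by_contra hc
    apply h
    apply Nat.eq_of_testBit_eq
    intro i
    rw [Nat.testBit_and, Nat.zero_testBit]
    by_cases ha : a.testBit i = true <;> by_cases hb : b.testBit i = true <;>
      simp_all
  · rintro ⟨i, h1, h2⟩ h0
    have := Nat.testBit_land a b i
    rw [h0, Nat.zero_testBit, h1, h2] at this
    simp at this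

-- per-bit evaluation of the two mask folds
lemma pv_bal_bit (s : String) (i : Nat) :
    (pvMask s pvBalTable).testBit i
    = (pvBalTable.any (fun tb => PySem.Str.isIn tb.1 s && tb.2.testBit i)) := by
  rw [pvMask, pv_testBit_foldl, Nat.zero_testBit, Bool.false_or]

lemma pv_heiz_bit (s : String) (i : Nat) :
    (pvMask s pvHeizTable).testBit i
    = (pvHeizTable.any (fun tb => PySem.Str.isIn tb.1 s && tb.2.testBit i)) := by
  rw [pvMask, pv_testBit_foldl, Nat.zero_testBit, Bool.false_or]

lemma pv_bit_bound (table : List (String × Nat)) (hall : ∀ tb ∈ table, tb.2 < 64)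
    (s : String) (i : Nat)
    (h : (table.any (fun tb => PySem.Str.isIn tb.1 s && tb.2.testBit i)) = true) : i < 6 := by
  obtain ⟨tb, htb, hx⟩ := List.any_eq_true.mp h
  rw [Bool.and_eq_true] at hx
  by_contra hge
  have hlt : tb.2 < 2 ^ i :=
    lt_of_lt_of_le (hall tb htb)
      (le_trans (by norm_num : (64:Nat) ≤ 2 ^ 6) (Nat.pow_le_pow_right (by norm_num) (by omega)))
  rw [Nat.testBit_eq_false_of_lt hlt] at hx
  exact absurd hx.2 (by simp)

set_option maxHeartbeats 2000000 in
-- THE KEY LEMMA: the bitwise-AND test equals A's group loop plus A's UNF/UN↔JIC branch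
lemma pv_masks_eq (bal heiz : String) :
    (!(pvMask bal pvBalTable &&& pvMask heiz pvHeizTable == 0))
    = (pvThreadGroups.any (fun group =>
         group.any (fun t => PySem.Str.isIn t bal) && group.any (fun t => PySem.Str.isIn t heiz))
       || ((PySem.Str.isIn "UNF" heiz || PySem.Str.isIn "UN" heiz) && PySem.Str.isIn "JIC" bal)) := by
  rw [Bool.eq_iff_iff, Bool.not_eq_true', beq_eq_false_iff_ne]
  rw [pv_land_ne_zero_iff]
  constructor
  · rintro ⟨i, h1, h2⟩
    rw [pv_bal_bit] at h1
    rw [pv_heiz_bit] at h2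
    have hi : i < 6 := pv_bit_bound _ (by decide) _ _ h1
    interval_cases i <;>
      simp only [pvBalTable, pvHeizTable, List.any_cons, List.any_nil,
        pv_tb_1_0, pv_tb_1_1, pv_tb_1_2, pv_tb_1_3, pv_tb_1_4, pv_tb_1_5,
        pv_tb_2_0, pv_tb_2_1, pv_tb_2_2, pv_tb_2_3, pv_tb_2_4, pv_tb_2_5,
        pv_tb_4_0, pv_tb_4_1, pv_tb_4_2, pv_tb_4_3, pv_tb_4_4, pv_tb_4_5,
        pv_tb_8_0, pv_tb_8_1, pv_tb_8_2, pv_tb_8_3, pv_tb_8_4, pv_tb_8_5,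
        pv_tb_16_0, pv_tb_16_1, pv_tb_16_2, pv_tb_16_3, pv_tb_16_4, pv_tb_16_5,
        pv_tb_32_0, pv_tb_32_1, pv_tb_32_2, pv_tb_32_3, pv_tb_32_4, pv_tb_32_5,
        pv_tb_33_0, pv_tb_33_1, pv_tb_33_2, pv_tb_33_3, pv_tb_33_4, pv_tb_33_5,
        Bool.and_true, Bool.and_false, Bool.or_false, Bool.false_or,
        Bool.or_eq_true] at h1 h2 <;>
      simp only [pvThreadGroups, List.any_cons, List.any_nil, Bool.or_eq_true,
        Bool.and_eq_true, Bool.or_false]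
    · exact Or.inl (Or.inl ⟨h1, h2⟩)
    · exact Or.inl (Or.inr (Or.inl ⟨h1, h2⟩))
    · exact Or.inl (Or.inr (Or.inr (Or.inl ⟨h1, h2⟩)))
    · exact Or.inl (Or.inr (Or.inr (Or.inr (Or.inl ⟨h1, h2⟩))))
    · exact Or.inl (Or.inr (Or.inr (Or.inr (Or.inr ⟨h1, h2⟩))))
    · exact Or.inr ⟨h2, h1⟩
  · intro h
    simp only [pvThreadGroups, List.any_cons, List.any_nil, Bool.or_eq_true,
      Bool.and_eq_true, Bool.or_false] at h
    have mk : ∀ i : Nat, ∀ tb ∈ pvBalTable, ∀ tb' ∈ pvHeizTable,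
        PySem.Str.isIn tb.1 bal = true → PySem.Str.isIn tb'.1 heiz = true →
        tb.2.testBit i = true → tb'.2.testBit i = true →
        (∃ j, (pvMask bal pvBalTable).testBit j = true ∧ (pvMask heiz pvHeizTable).testBit j = true) := by
      intro i tb htb tb' htb' hin hin' hb hb'
      exact ⟨i, by rw [pv_bal_bit]; exact List.any_eq_true.mpr ⟨tb, htb, by rw [Bool.and_eq_true]; exact ⟨hin, hb⟩⟩,
                by rw [pv_heiz_bit]; exact List.any_eq_true.mpr ⟨tb', htb', by rw [Bool.and_eq_true]; exact ⟨hin', hb'⟩⟩⟩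
    rcases h with (⟨hb, hh⟩ | ⟨hb, hh⟩ | ⟨hb, hh⟩ | ⟨hb, hh⟩ | ⟨hb, hh⟩) | ⟨hh, hb⟩
    · rcases hb with hb | hb | hb | hb
      · rcases hh with hh | hh | hh | hh
        · exact mk 0 ("JIC", 33) (by simp [pvBalTable]) ("JIC", 1) (by simp [pvHeizTable]) hb hh (by decide) (by decide)
        · exact mk 0 ("JIC", 33) (by simp [pvBalTable]) ("JIC 37", 1) (by simp [pvHeizTable]) hb hh (by decide) (by decide)
        · exact mk 0 ("JIC", 33) (by simp [pvBalTable]) ("JIC 37°", 1) (by simp [pvHeizTable]) hb hh (by decide) (by decide)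
        · exact mk 0 ("JIC", 33) (by simp [pvBalTable]) ("SAE J514", 1) (by simp [pvHeizTable]) hb hh (by decide) (by decide)
      · rcases hh with hh | hh | hh | hh
        · exact mk 0 ("JIC 37", 1) (by simp [pvBalTable]) ("JIC", 1) (by simp [pvHeizTable]) hb hh (by decide) (by decide)
        · exact mk 0 ("JIC 37", 1) (by simp [pvBalTable]) ("JIC 37", 1) (by simp [pvHeizTable]) hb hh (by decide) (by decide)
        · exact mk 0 ("JIC 37", 1) (by simp [pvBalTable]) ("JIC 37°", 1) (by simp [pvHeizTable]) hb hh (by decide) (by decide)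
        · exact mk 0 ("JIC 37", 1) (by simp [pvBalTable]) ("SAE J514", 1) (by simp [pvHeizTable]) hb hh (by decide) (by decide)
      · rcases hh with hh | hh | hh | hh
        · exact mk 0 ("JIC 37°", 1) (by simp [pvBalTable]) ("JIC", 1) (by simp [pvHeizTable]) hb hh (by decide) (by decide)
        · exact mk 0 ("JIC 37°", 1) (by simp [pvBalTable]) ("JIC 37", 1) (by simp [pvHeizTable]) hb hh (by decide) (by decide)
        · exact mk 0 ("JIC 37°", 1) (by simp [pvBalTable]) ("JIC 37°", 1) (by simp [pvHeizTable]) hb hh (by decide) (by decide)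
        · exact mk 0 ("JIC 37°", 1) (by simp [pvBalTable]) ("SAE J514", 1) (by simp [pvHeizTable]) hb hh (by decide) (by decide)
      · rcases hh with hh | hh | hh | hh
        · exact mk 0 ("SAE J514", 1) (by simp [pvBalTable]) ("JIC", 1) (by simp [pvHeizTable]) hb hh (by decide) (by decide)
        · exact mk 0 ("SAE J514", 1) (by simp [pvBalTable]) ("JIC 37", 1) (by simp [pvHeizTable]) hb hh (by decide) (by decide)
        · exact mk 0 ("SAE J514", 1) (by simp [pvBalTable]) ("JIC 37°", 1) (by simp [pvHeizTable]) hb hh (by decide) (by decide)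
        · exact mk 0 ("SAE J514", 1) (by simp [pvBalTable]) ("SAE J514", 1) (by simp [pvHeizTable]) hb hh (by decide) (by decide)
    · rcases hb with hb | hb
      · rcases hh with hh | hh
        · exact mk 1 ("ORFS", 2) (by simp [pvBalTable]) ("ORFS", 2) (by simp [pvHeizTable]) hb hh (by decide) (by decide)
        · exact mk 1 ("ORFS", 2) (by simp [pvBalTable]) ("O-RING FACE SEAL", 2) (by simp [pvHeizTable]) hb hh (by decide) (by decide)
      · rcases hh with hh | hh
        · exact mk 1 ("O-RING FACE SEAL", 2) (by simp [pvBalTable]) ("ORFS", 2) (by simp [pvHeizTable]) hb hh (by decide) (by decide)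
        · exact mk 1 ("O-RING FACE SEAL", 2) (by simp [pvBalTable]) ("O-RING FACE SEAL", 2) (by simp [pvHeizTable]) hb hh (by decide) (by decide)
    · rcases hb with hb | hb | hb | hb
      · rcases hh with hh | hh | hh | hh
        · exact mk 2 ("BSP", 4) (by simp [pvBalTable]) ("BSP", 4) (by simp [pvHeizTable]) hb hh (by decide) (by decide)
        · exact mk 2 ("BSP", 4) (by simp [pvBalTable]) ("BSPP", 4) (by simp [pvHeizTable]) hb hh (by decide) (by decide)
        · exact mk 2 ("BSP", 4) (by simp [pvBalTable]) ("BSPT", 4) (by simp [pvHeizTable]) hb hh (by decide) (by decide)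
        · exact mk 2 ("BSP", 4) (by simp [pvBalTable]) ("G", 4) (by simp [pvHeizTable]) hb hh (by decide) (by decide)
      · rcases hh with hh | hh | hh | hh
        · exact mk 2 ("BSPP", 4) (by simp [pvBalTable]) ("BSP", 4) (by simp [pvHeizTable]) hb hh (by decide) (by decide)
        · exact mk 2 ("BSPP", 4) (by simp [pvBalTable]) ("BSPP", 4) (by simp [pvHeizTable]) hb hh (by decide) (by decide)
        · exact mk 2 ("BSPP", 4) (by simp [pvBalTable]) ("BSPT", 4) (by simp [pvHeizTable]) hb hh (by decide) (by decide)
        · exact mk 2 ("BSPP", 4) (by simp [pvBalTable]) ("G", 4) (by simp [pvHeizTable]) hb hh (by decide) (by decide)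
      · rcases hh with hh | hh | hh | hh
        · exact mk 2 ("BSPT", 4) (by simp [pvBalTable]) ("BSP", 4) (by simp [pvHeizTable]) hb hh (by decide) (by decide)
        · exact mk 2 ("BSPT", 4) (by simp [pvBalTable]) ("BSPP", 4) (by simp [pvHeizTable]) hb hh (by decide) (by decide)
        · exact mk 2 ("BSPT", 4) (by simp [pvBalTable]) ("BSPT", 4) (by simp [pvHeizTable]) hb hh (by decide) (by decide)
        · exact mk 2 ("BSPT", 4) (by simp [pvBalTable]) ("G", 4) (by simp [pvHeizTable]) hb hh (by decide) (by decide)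
      · rcases hh with hh | hh | hh | hh
        · exact mk 2 ("G", 4) (by simp [pvBalTable]) ("BSP", 4) (by simp [pvHeizTable]) hb hh (by decide) (by decide)
        · exact mk 2 ("G", 4) (by simp [pvBalTable]) ("BSPP", 4) (by simp [pvHeizTable]) hb hh (by decide) (by decide)
        · exact mk 2 ("G", 4) (by simp [pvBalTable]) ("BSPT", 4) (by simp [pvHeizTable]) hb hh (by decide) (by decide)
        · exact mk 2 ("G", 4) (by simp [pvBalTable]) ("G", 4) (by simp [pvHeizTable]) hb hh (by decide) (by decide)
    · rcases hb with hb | hb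
      · rcases hh with hh | hh
        · exact mk 3 ("NPT", 8) (by simp [pvBalTable]) ("NPT", 8) (by simp [pvHeizTable]) hb hh (by decide) (by decide)
        · exact mk 3 ("NPT", 8) (by simp [pvBalTable]) ("NPTF", 8) (by simp [pvHeizTable]) hb hh (by decide) (by decide)
      · rcases hh with hh | hh
        · exact mk 3 ("NPTF", 8) (by simp [pvBalTable]) ("NPT", 8) (by simp [pvHeizTable]) hb hh (by decide) (by decide)
        · exact mk 3 ("NPTF", 8) (by simp [pvBalTable]) ("NPTF", 8) (by simp [pvHeizTable]) hb hh (by decide) (by decide)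
    · rcases hb with hb | hb | hb
      · rcases hh with hh | hh | hh
        · exact mk 4 ("METRIC", 16) (by simp [pvBalTable]) ("METRIC", 16) (by simp [pvHeizTable]) hb hh (by decide) (by decide)
        · exact mk 4 ("METRIC", 16) (by simp [pvBalTable]) ("M", 16) (by simp [pvHeizTable]) hb hh (by decide) (by decide)
        · exact mk 4 ("METRIC", 16) (by simp [pvBalTable]) ("DIN", 16) (by simp [pvHeizTable]) hb hh (by decide) (by decide)
      · rcases hh with hh | hh | hh
        · exact mk 4 ("M", 16) (by simp [pvBalTable]) ("METRIC", 16) (by simp [pvHeizTable]) hb hh (by decide) (by decide)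
        · exact mk 4 ("M", 16) (by simp [pvBalTable]) ("M", 16) (by simp [pvHeizTable]) hb hh (by decide) (by decide)
        · exact mk 4 ("M", 16) (by simp [pvBalTable]) ("DIN", 16) (by simp [pvHeizTable]) hb hh (by decide) (by decide)
      · rcases hh with hh | hh | hh
        · exact mk 4 ("DIN", 16) (by simp [pvBalTable]) ("METRIC", 16) (by simp [pvHeizTable]) hb hh (by decide) (by decide)
        · exact mk 4 ("DIN", 16) (by simp [pvBalTable]) ("M", 16) (by simp [pvHeizTable]) hb hh (by decide) (by decide)
        · exact mk 4 ("DIN", 16) (by simp [pvBalTable]) ("DIN", 16) (by simp [pvHeizTable]) hb hh (by decide) (by decide)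
    · rcases hh with hh | hh
      · exact mk 5 ("JIC", 33) (by simp [pvBalTable]) ("UNF", 32) (by simp [pvHeizTable]) hb hh (by decide) (by decide)
      · exact mk 5 ("JIC", 33) (by simp [pvBalTable]) ("UN", 32) (by simp [pvHeizTable]) hb hh (by decide) (by decide)

-- A's if-chain over the same boolean atoms equals B's or-chain
lemma pv_chain (a c u j : Bool) :
    (if a then true else if c then true else if u then (if j then true else false) else false)
    = (a || (c || u && j)) := by
  cases a <;> cases c <;> cases u <;> cases j <;> rfl

-- ===== VERDICT (by name: the statement is the Claim_ definition above) =====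
theorem threads_match_py_spec : Claim_equal_threads_match_py := by
  intro b h _
  unfold Spec_threads_match_py threads_match_py threads_match_py_alt
  split
  · rfl
  · simp only [pv_masks_eq, pv_chain]
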